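-- pv_equiv track=rewrite | github.com/vovoks/word_parser | main.py | sentence_splitter
-- ===== SOURCE A (Python) =====
-- from typing import List
--
-- def sentence_splitter(text: str) -> List[str]:
--     word_separators = [' ', ',', ':', ';', '.', ',', '?', '!', '\n', '–', '(', ')', '«', '»', '…']
--     words = []
--     buffer = ''
--
--     for index in range(len(text)):
--         value = text[index]
--         if value in word_separators:
--             if len(buffer) >= 4:
--                 words.append(buffer.lower())
--             buffer = ''
--         else:
--             buffer += value
--
--     return words
-- ===== SOURCE B (Python) =====
-- def sentence_splitter(text):
--     separators = ' ,:;.?!\n\u2013()\u00ab\u00bb\u2026'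
--     normalized = ''.join(' ' if c in separators else c for c in text)
--     parts = normalized.split(' ')
--     return [w.lower() for w in parts[:-1] if len(w) >= 4]
-- ===== Notes on version B (the rewrite author's own statement) =====
-- stated objective: idiomatic
-- what changed: Replaced A's stateful char-by-char buffer accumulation with normalise-then-split: map every separator char to ' ', split on ' ', drop the trailing unterminated segment (matching A's never-flushed final buffer), filter length >= 4 and lowercase via a comprehension.
import Mathlib
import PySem

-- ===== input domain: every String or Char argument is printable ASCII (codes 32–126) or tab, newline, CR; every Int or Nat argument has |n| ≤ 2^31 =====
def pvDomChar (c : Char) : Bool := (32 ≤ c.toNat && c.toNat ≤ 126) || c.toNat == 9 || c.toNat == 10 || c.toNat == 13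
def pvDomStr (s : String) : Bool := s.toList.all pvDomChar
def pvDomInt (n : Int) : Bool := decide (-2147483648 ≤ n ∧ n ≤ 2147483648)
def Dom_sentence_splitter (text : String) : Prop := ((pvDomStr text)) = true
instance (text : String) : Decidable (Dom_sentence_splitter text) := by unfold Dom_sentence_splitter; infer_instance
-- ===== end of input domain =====

-- B replaces A's stateful char-by-char buffer loop by normalise-then-split: map every
-- separator to ' ', split on ' ', drop the trailing unterminated segment (reproducing A's
-- behaviour of never flushing the final buffer), filter length ≥ 4 and lowercase (objective: idiomatic).

-- ===== PORT A =====
-- A-side helper: the loop body of A's for-loop, acting on the state (words, buffer)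
def pvStepA (st : List String × List Char) (value : Char) : List String × List Char :=
  if ([' ', ',', ':', ';', '.', ',', '?', '!', '\n', '–', '(', ')', '«', '»', '…'] : List Char).contains value then
    ((if 4 ≤ st.2.length then st.1 ++ [String.ofList (PySem.Chars.lower st.2)] else st.1), [])
  else
    (st.1, st.2 ++ [value])

def sentence_splitter (text : String) : List String :=
  (text.toList.foldl pvStepA ([], [])).1

-- ===== PORT B =====
def sentence_splitter_alt (text : String) : List String :=
  let separators : List Char := " ,:;.?!\n–()«»…".toList
  let normalized : List Char := text.toList.map (fun c => if separators.contains c then ' ' else c)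
  let parts : List (List Char) := normalized.splitOn ' '   -- normalized.split(' ')
  (parts.dropLast.filter (fun w => 4 ≤ w.length)).map (fun w => String.ofList (PySem.Chars.lower w))

-- ===== PRECONDITION & SPEC =====
def Spec_sentence_splitter (text : String) (out : List String) : Prop := out = sentence_splitter_alt text
instance (text : String) (out : List String) : Decidable (Spec_sentence_splitter text out) := by unfold Spec_sentence_splitter; infer_instance

-- ===== CLAIM (what is proved, stated in full; the proofs are below) =====
def Claim_equal_sentence_splitter : Prop := ∀ (text : String), Dom_sentence_splitter text → Spec_sentence_splitter text (sentence_splitter text)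

-- ===== LEMMAS AND PROOFS =====

def pvIsSep (c : Char) : Bool :=
  ([' ', ',', ':', ';', '.', '?', '!', '\n', '–', '(', ')', '«', '»', '…'] : List Char).contains c

def pvF (c : Char) : Char := if pvIsSep c then ' ' else c

def pvPost (gs : List (List Char)) : List String :=
  (gs.filter (fun w => 4 ≤ w.length)).map (fun w => String.ofList (PySem.Chars.lower w))

theorem pvSepsB_toList :
    (" ,:;.?!\n–()«»…".toList)
      = ([' ', ',', ':', ';', '.', '?', '!', '\n', '–', '(', ')', '«', '»', '…'] : List Char) := by
  decide

theorem pvSepA_eq (c : Char) :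
    (([' ', ',', ':', ';', '.', ',', '?', '!', '\n', '–', '(', ')', '«', '»', '…'] : List Char).contains c)
      = pvIsSep c := by
  cases h : (c == ',') <;>
    simp only [pvIsSep, List.contains_cons, List.contains_nil, h] <;> simp

theorem pvMH_nil (gs : List (List Char)) :
    (gs.modifyHead (fun g => ([] : List Char) ++ g)) = gs := by
  cases gs <;> simp

theorem pvMH_mh (b : List Char) (c : Char) (gs : List (List Char)) :
    ((gs.modifyHead (List.cons c)).modifyHead (fun g => b ++ g))
      = gs.modifyHead (fun g => (b ++ [c]) ++ g) := by
  cases gs <;> simp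

theorem pvPost_cons (b : List Char) (gs : List (List Char)) :
    pvPost (b :: gs) = (if 4 ≤ b.length then [String.ofList (PySem.Chars.lower b)] else []) ++ pvPost gs := by
  simp only [pvPost, List.filter_cons]
  split_ifs with h <;> simp_all

theorem pvMH_id (gs : List (List Char)) :
    (gs.modifyHead (fun g : List Char => g)) = gs := by
  cases gs <;> rfl

theorem pvLoop (cs : List Char) : ∀ (words : List String) (buffer : List Char),
    (cs.foldl pvStepA (words, buffer)).1
      = words ++ pvPost ((((cs.map pvF).splitOn ' ').modifyHead (fun g => buffer ++ g)).dropLast) := by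
  induction cs with
  | nil =>
    intro words buffer
    simp [pvPost, List.splitOn, List.splitOnP_nil, List.modifyHead]
  | cons c cs ih =>
    intro words buffer
    rw [List.foldl_cons]
    by_cases h : pvIsSep c = true
    · have hf : pvF c = ' ' := by simp [pvF, h]
      have hca : (([' ', ',', ':', ';', '.', ',', '?', '!', '\n', '–', '(', ')', '«', '»', '…'] : List Char).contains c) = true := by
        rw [pvSepA_eq]; exact h
      have hA : pvStepA (words, buffer) c
          = ((if 4 ≤ buffer.length then words ++ [String.ofList (PySem.Chars.lower buffer)] else words), []) := by
        simp only [pvStepA, hca]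
        norm_num
      rw [hA, ih]
      rw [List.map_cons, hf]
      rw [show ((' ' :: cs.map pvF).splitOn ' ') = [] :: ((cs.map pvF).splitOn ' ') by
        simp [List.splitOn, List.splitOnP_cons]]
      rw [List.modifyHead_cons, List.dropLast_cons_of_ne_nil (by
        intro hnil
        exact List.splitOnP_ne_nil _ _ hnil)]
      rw [pvMH_nil, pvPost_cons]
      simp only [List.append_nil]
      split_ifs with hb <;> simp
    · have hf : pvF c = c := by simp [pvF, h]
      have hca : (([' ', ',', ':', ';', '.', ',', '?', '!', '\n', '–', '(', ')', '«', '»', '…'] : List Char).contains c) = false := by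
        rw [pvSepA_eq]; simpa using h
      have hcsp : (c == ' ') = false := by
        cases hcc : (c == ' ')
        · rfl
        · exfalso
          apply h
          have hc' : c = ' ' := by simpa using hcc
          rw [hc']; decide
      have hA : pvStepA (words, buffer) c = (words, buffer ++ [c]) := by
        simp only [pvStepA, hca]
        norm_num
      rw [hA, ih]
      rw [List.map_cons, hf]
      rw [show ((c :: cs.map pvF).splitOn ' ')
            = ((cs.map pvF).splitOn ' ').modifyHead (List.cons c) by
        simp [List.splitOn, List.splitOnP_cons, hcsp]]
      rw [pvMH_mh]

-- ===== VERDICT (by name: the statement is the Claim_ definition above) =====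
theorem sentence_splitter_spec : Claim_equal_sentence_splitter := by
  intro text _
  unfold Spec_sentence_splitter sentence_splitter sentence_splitter_alt
  rw [pvLoop]
  simp only [pvSepsB_toList, List.nil_append]
  have hfun : (fun c => if (([' ', ',', ':', ';', '.', '?', '!', '\n', '–', '(', ')', '«', '»', '…'] : List Char).contains c) = true then ' ' else c) = pvF := by
    funext c; simp [pvF, pvIsSep]
  rw [hfun]
  rw [show (List.modifyHead (fun g : List Char => g) (List.splitOn ' ' (List.map pvF text.toList))) = List.splitOn ' ' (List.map pvF text.toList) from pvMH_id _]
  rfl
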